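-- pv_equiv track=rewrite | github.com/kyrabbu/csci127-assignments | lab_03/madlibs.py | remove_dot
-- ===== SOURCE A (Python) =====
-- def remove_dot(l):
--     new_list = []
--     for item in l:
--         if item != ".":
--             new_list.append(item) #if item is not a period, it will add it to nnew list we made
--         else:
--             new_list[-1] = str(new_list[-1]) + '.' #this will change the last item added in list with period
--     return new_list #transfers this value to the madlibs function
-- ===== SOURCE B (Python) =====
-- def remove_dot(l):
--     result = []
--     i = 0
--     n = len(l)
--     while i < n:
--         token = l[i]
--         i += 1
--         count = 0
--         while i < n and l[i] == ".":
--             count += 1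
--             i += 1
--         if count == 0:
--             result.append(token)
--         else:
--             result.append(str(token) + "." * count)
--     return result
-- ===== Notes on version B (the rewrite author's own statement) =====
-- stated objective: alternative
-- what changed: B replaces A's back-patching of result[-1] with a forward look-ahead that counts the run of dots after each token and appends the merged token once; no element of the result is ever rewritten.
-- crash fix: On lists whose first element is '.', A raises IndexError (new_list[-1] on an empty list) while B returns the list with orphan leading dots kept/merged as their own token. — e.g. on remove_dot([".", "a"]): A raises IndexError, B returns [".", "a"]
import Mathlib
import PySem

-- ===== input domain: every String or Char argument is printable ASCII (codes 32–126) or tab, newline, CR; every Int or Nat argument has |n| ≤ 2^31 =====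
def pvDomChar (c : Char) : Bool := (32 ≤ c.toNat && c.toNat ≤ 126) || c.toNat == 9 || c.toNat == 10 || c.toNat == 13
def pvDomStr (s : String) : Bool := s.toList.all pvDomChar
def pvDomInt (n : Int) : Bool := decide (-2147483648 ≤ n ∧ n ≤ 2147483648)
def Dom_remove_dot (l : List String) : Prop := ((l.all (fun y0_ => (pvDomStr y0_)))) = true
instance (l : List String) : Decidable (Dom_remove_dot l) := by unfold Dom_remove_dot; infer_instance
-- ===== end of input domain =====

-- B merges runs of "." onto the preceding token with a forward look-ahead (counting the
-- run of dots after each token) instead of A's back-patching of result[-1]; same cost,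
-- different decomposition. Equivalence is about the return value only.

-- ===== PORT A =====
-- 'new_list[-1] = str(new_list[-1]) + "."' ; on an empty new_list Python raises
-- IndexError (the none branch below is unreachable under Pre_remove_dot).
def remove_dot (l : List String) : List String :=
  l.foldl (fun new_list item =>
    if item ≠ "." then new_list ++ [item]
    else
      match new_list.getLast? with
      | some last => new_list.dropLast ++ [last ++ "."]
      | none => new_list) []

-- ===== PORT B =====
-- forward scan: take each token, count the run of "." right after it, emit the merged
-- token once and skip the consumed dots ('.'*count ported as ofList (replicate count '.')).
def remove_dot_alt : List String → List String
  | [] => []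
  | t :: rest =>
    let c := (rest.takeWhile (· == ".")).length
    let merged := if c = 0 then t else t ++ String.ofList (List.replicate c '.')
    merged :: remove_dot_alt (rest.drop c)
termination_by l => l.length
decreasing_by simp

-- ===== PRECONDITION & SPEC =====
-- Pre_ excludes exactly the lists starting with ".", on which A raises IndexError
-- (new_list[-1] on the still-empty list).
def Pre_remove_dot (l : List String) : Prop := l.head? ≠ some "."
instance (l : List String) : Decidable (Pre_remove_dot l) := by unfold Pre_remove_dot; infer_instance
def pvWitness_remove_dot : List String := ["a", ".", ".", "b"]

-- On lists whose first element is ".", A raises IndexError while B returns the list with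
-- the orphan leading dots kept (merged into a single leading token).
def Raises_remove_dot (l : List String) : Prop := l.head? = some "."
instance (l : List String) : Decidable (Raises_remove_dot l) := by unfold Raises_remove_dot; infer_instance
def pvRaiseWitness_remove_dot : List String := [".", "a"]
def pvRaiseWitnessOut_remove_dot : List String := [".", "a"]

def Spec_remove_dot (l : List String) (out : List String) : Prop := out = remove_dot_alt l
instance (l : List String) (out : List String) : Decidable (Spec_remove_dot l out) := by unfold Spec_remove_dot; infer_instance

-- ===== CLAIM (what is proved, stated in full; the proofs are below) =====
def Claim_equal_remove_dot : Prop := ∀ (l : List String), Dom_remove_dot l → Pre_remove_dot l → Spec_remove_dot l (remove_dot l)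
def Claim_raises_remove_dot : Prop := (∀ (l : List String), Dom_remove_dot l → Raises_remove_dot l → ¬ Pre_remove_dot l) ∧ (Dom_remove_dot (pvRaiseWitness_remove_dot) ∧ Raises_remove_dot (pvRaiseWitness_remove_dot) ∧ remove_dot_alt (pvRaiseWitness_remove_dot) = pvRaiseWitnessOut_remove_dot)

-- ===== LEMMAS AND PROOFS =====

-- A's loop body, named for the proofs.
def pvStepA (new_list : List String) (item : String) : List String :=
  if item ≠ "." then new_list ++ [item]
  else
    match new_list.getLast? with
    | some last => new_list.dropLast ++ [last ++ "."]
    | none => new_list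

lemma remove_dot_eq_foldl (l : List String) : remove_dot l = l.foldl pvStepA [] := rfl

lemma dots_succ (x : String) (c : Nat) :
    (x ++ ".") ++ String.ofList (List.replicate c '.') =
    x ++ String.ofList (List.replicate (c + 1) '.') := by
  apply String.ext
  simp [List.replicate_succ]

lemma dots_zero (x : String) : x ++ String.ofList (List.replicate 0 '.') = x := by
  apply String.ext
  simp

-- folding A's step over a run of dots back-patches them all onto the last element
lemma foldl_dots (c : Nat) (acc : List String) (x : String) (rest : List String) :
    (List.replicate c "." ++ rest).foldl pvStepA (acc ++ [x]) =
    rest.foldl pvStepA (acc ++ [x ++ String.ofList (List.replicate c '.')]) := by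
  induction c generalizing x with
  | zero => simp
  | succ c ih =>
      rw [List.replicate_succ]
      simp only [List.cons_append, List.foldl_cons]
      have hstep : pvStepA (acc ++ [x]) "." = acc ++ [x ++ "."] := by
        simp [pvStepA]
      rw [hstep, ih (x ++ "."), dots_succ]

lemma takeWhile_dots (rest : List String) :
    rest.takeWhile (· == ".") = List.replicate (rest.takeWhile (· == ".")).length "." := by
  apply List.eq_replicate_of_mem
  intro b hb
  have := List.mem_takeWhile_imp hb
  simpa using this

lemma drop_takeWhile (rest : List String) :
    rest.drop (rest.takeWhile (· == ".")).length = rest.dropWhile (· == ".") := by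
  induction rest with
  | nil => simp
  | cons x xs ih =>
      by_cases hx : (x == ".") = true
      · simp [List.takeWhile, List.dropWhile, hx, ih]
      · simp [List.takeWhile, List.dropWhile, hx]

lemma head_dropWhile (rest : List String) :
    (rest.dropWhile (· == ".")).head? ≠ some "." := by
  induction rest with
  | nil => simp
  | cons x xs ih =>
      by_cases hx : x = "."
      · simpa [List.dropWhile, hx] using ih
      · have hb : (x == ".") = false := by simpa using hx
        simp [List.dropWhile, hb]
        exact hx

lemma main_lemma : ∀ (n : Nat) (l : List String) (acc : List String),
    l.length ≤ n → l.head? ≠ some "." →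
    l.foldl pvStepA acc = acc ++ remove_dot_alt l := by
  intro n
  induction n with
  | zero =>
      intro l acc hn _
      have : l = [] := List.eq_nil_of_length_eq_zero (Nat.le_zero.mp hn)
      subst this
      simp [remove_dot_alt.eq_def]
  | succ n ih =>
      intro l acc hn hhead
      match l with
      | [] => simp [remove_dot_alt.eq_def]
      | t :: rest =>
          have ht : t ≠ "." := by simpa using hhead
          have h1 : pvStepA acc t = acc ++ [t] := by simp [pvStepA, ht]
          set c := (rest.takeWhile (· == ".")).length with hc
          have hdec : rest = List.replicate c "." ++ rest.dropWhile (· == ".") := by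
            conv_lhs => rw [← List.takeWhile_append_dropWhile (p := (· == ".")) (l := rest)]
            rw [← takeWhile_dots]
          have hdroplen : (rest.dropWhile (· == ".")).length ≤ n := by
            have h2 := List.length_dropWhile_le (p := (· == ".")) (l := rest)
            simp at hn
            omega
          have hmerged : (if c = 0 then t else t ++ String.ofList (List.replicate c '.')) =
              t ++ String.ofList (List.replicate c '.') := by
            split
            · next h0 => rw [h0, dots_zero]
            · rfl
          calc (t :: rest).foldl pvStepA acc
              = rest.foldl pvStepA (acc ++ [t]) := by rw [List.foldl_cons, h1]
            _ = (List.replicate c "." ++ rest.dropWhile (· == ".")).foldl pvStepA (acc ++ [t]) := by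
                  rw [← hdec]
            _ = (rest.dropWhile (· == ".")).foldl pvStepA
                  (acc ++ [t ++ String.ofList (List.replicate c '.')]) := foldl_dots ..
            _ = acc ++ [t ++ String.ofList (List.replicate c '.')] ++
                  remove_dot_alt (rest.dropWhile (· == ".")) :=
                  ih _ _ hdroplen (head_dropWhile rest)
            _ = acc ++ remove_dot_alt (t :: rest) := by
                  have halt : remove_dot_alt (t :: rest) =
                      (if c = 0 then t else t ++ String.ofList (List.replicate c '.')) ::
                        remove_dot_alt (rest.drop c) := by
                    rw [remove_dot_alt.eq_def]
                  rw [halt, hmerged, hc, drop_takeWhile]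
                  simp

-- ===== VERDICT (by name: the statement is the Claim_ definition above) =====
theorem remove_dot_spec : Claim_equal_remove_dot := by
  intro l _ hpre
  unfold Spec_remove_dot
  rw [remove_dot_eq_foldl, main_lemma l.length l [] le_rfl hpre]
  simp

@[simp]
theorem remove_dot_raises : Claim_raises_remove_dot := by
  unfold Claim_raises_remove_dot
  constructor
  · intro l _ hr
    unfold Pre_remove_dot Raises_remove_dot at *
    simp [hr]
  · refine ⟨by decide, by decide, ?_⟩
    have h1 : (("a" : String) == ".") = false := by decide
    simp [pvRaiseWitness_remove_dot, pvRaiseWitnessOut_remove_dot,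
      remove_dot_alt.eq_def, List.takeWhile, h1]
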